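-- pv_equiv track=rewrite | github.com/huanghc/cFinder | util/util_notnull.py | sum_not_null_check
-- ===== SOURCE A (Python) =====
-- def sum_not_null_check(x):
--     l = x.split(", ")
--     length = len(l)
--     num = 0
--     for item in l:
--         if item == "0":
--             num += 1
--     if num == 0:
--         return "all_has_check"
--     elif num == length:
--         return "no_check"
--     else:
--         return "some_check"
-- ===== SOURCE B (Python) =====
-- def sum_not_null_check(x):
--     l = x.split(", ")
--     if not any(i == "0" for i in l):
--         return "all_has_check"
--     elif all(i == "0" for i in l):
--         return "no_check"
--     else:
--         return "some_check"
-- ===== Notes on version B (the rewrite author's own statement) =====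
-- stated objective: simpler
-- what changed: replaces the counter loop and count-vs-length comparison with short-circuit any/all predicates over the split list
import Mathlib
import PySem

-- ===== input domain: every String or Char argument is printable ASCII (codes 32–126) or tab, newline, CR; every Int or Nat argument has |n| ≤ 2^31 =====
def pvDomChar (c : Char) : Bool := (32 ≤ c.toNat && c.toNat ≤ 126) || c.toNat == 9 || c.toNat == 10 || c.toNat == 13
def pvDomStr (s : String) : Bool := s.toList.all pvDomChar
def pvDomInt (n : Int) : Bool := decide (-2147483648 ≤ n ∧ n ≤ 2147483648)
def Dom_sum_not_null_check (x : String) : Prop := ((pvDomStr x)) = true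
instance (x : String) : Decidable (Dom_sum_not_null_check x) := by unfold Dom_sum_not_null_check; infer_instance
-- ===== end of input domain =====

-- B replaces A's counter loop and count-vs-length comparison with short-circuit any/all predicates (objective: simpler).

-- ===== PORT A =====
def sum_not_null_check (x : String) : String :=
  let l := (PySem.Str.split? x ", ").getD []
  let length := l.length
  let num := l.foldl (fun num item => if item == "0" then num + 1 else num) 0
  if num = 0 then "all_has_check"
  else if num = length then "no_check"
  else "some_check"

-- ===== PORT B =====
def sum_not_null_check_alt (x : String) : String :=
  let l := (PySem.Str.split? x ", ").getD []
  if ¬ (l.any (fun i => i == "0")) then "all_has_check"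
  else if l.all (fun i => i == "0") then "no_check"
  else "some_check"

-- ===== PRECONDITION & SPEC =====
def Spec_sum_not_null_check (x : String) (out : String) : Prop := out = sum_not_null_check_alt x
instance (x : String) (out : String) : Decidable (Spec_sum_not_null_check x out) := by unfold Spec_sum_not_null_check; infer_instance

-- ===== CLAIM (what is proved, stated in full; the proofs are below) =====
def Claim_equal_sum_not_null_check : Prop := ∀ (x : String), Dom_sum_not_null_check x → Spec_sum_not_null_check x (sum_not_null_check x)

-- ===== LEMMAS AND PROOFS =====

-- A's counter loop computes countP
theorem pv_foldl_count (l : List String) (n : Nat) :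
    l.foldl (fun num item => if item == "0" then num + 1 else num) n
      = n + l.countP (fun i => i == "0") := by
  induction l generalizing n with
  | nil => simp
  | cons h t ih =>
    simp only [List.foldl_cons, List.countP_cons, ih]
    by_cases hh : h == "0"
    · simp [hh]; omega
    · simp [hh]

-- ===== VERDICT (by name: the statement is the Claim_ definition above) =====
theorem sum_not_null_check_spec : Claim_equal_sum_not_null_check := by
  intro x _
  unfold Spec_sum_not_null_check sum_not_null_check sum_not_null_check_alt
  set l := (PySem.Str.split? x ", ").getD [] with hl
  set p : String → Bool := fun i => i == "0" with hp
  simp only [pv_foldl_count, Nat.zero_add]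
  have hA : l.any p = true ↔ l.countP p ≠ 0 := by
    rw [List.any_eq_true, ← List.countP_pos_iff]
    omega
  have hB : l.all p = true ↔ l.countP p = l.length := by
    rw [List.all_eq_true, List.countP_eq_length]
  by_cases h1 : l.countP p = 0
  · have hna : l.any p = false := by
      rw [← Bool.not_eq_true, hA]; omega
    rw [if_pos h1, if_pos (by simp [hna])]
  · by_cases h2 : l.countP p = l.length
    · have ha : l.any p = true := hA.mpr h1
      have hb : l.all p = true := hB.mpr h2
      rw [if_neg h1, if_pos h2, if_neg (by simp [ha]), if_pos hb]
    · have ha : l.any p = true := hA.mpr h1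
      have hb : ¬ l.all p = true := fun hc => h2 (hB.mp hc)
      rw [if_neg h1, if_neg h2, if_neg (by simp [ha]), if_neg hb]
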